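-- pv_equiv track=rewrite | github.com/ajamaloodin/myTrainingPath | Certified Python Course/ejercicios/prueba.py | create_inventory
-- ===== SOURCE A (Python) =====
-- def create_inventory(items):
--     invent = {}
--     long = len(items)
--     procesada = []
--     for index, item in enumerate(items):
--         if item not in procesada:
--             count = 1
--             index2 = index + 1
--             while index2 < long and item not in procesada:
--                 if item in items[index2::]:
--                     count += 1
--                 index2 += 1
--             invent[item] = count
--             procesada.append(item)
--     return invent
-- ===== SOURCE B (Python) =====
-- def create_inventory(items):
--     first = {}
--     last = {}
--     for index, item in enumerate(items):
--         if item not in first: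
--             first[item] = index
--         last[item] = index
--     return {item: last[item] - first[item] + 1 for item in first}
-- ===== Notes on version B (the rewrite author's own statement) =====
-- stated objective: faster
-- what changed: Replaced the per-item while loop that repeatedly scans suffix slices with a single pass recording first and last occurrence indices per item, then computing last-first+1.
import Mathlib
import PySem

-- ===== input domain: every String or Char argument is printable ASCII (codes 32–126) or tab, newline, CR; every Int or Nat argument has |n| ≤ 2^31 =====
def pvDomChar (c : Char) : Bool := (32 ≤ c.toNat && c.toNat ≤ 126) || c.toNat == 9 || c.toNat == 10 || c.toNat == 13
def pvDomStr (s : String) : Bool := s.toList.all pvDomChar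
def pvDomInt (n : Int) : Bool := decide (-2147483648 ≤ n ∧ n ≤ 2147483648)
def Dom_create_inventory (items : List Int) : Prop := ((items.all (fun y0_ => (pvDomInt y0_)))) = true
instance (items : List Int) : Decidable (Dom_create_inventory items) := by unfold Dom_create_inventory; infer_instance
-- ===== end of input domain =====

-- B replaces A's per-item suffix-rescanning while loop by one pass storing first/last
-- occurrence indices per item (objective: faster, O(n) instead of O(n^3)).

-- ===== PORT A =====
-- the inner 'while index2 < long and item not in procesada: if item in items[index2::]: count += 1; index2 += 1'
-- (fuel = items.length is enough since index2 starts ≥ 1 and increases to long)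
def pvWhileA (items : List Int) (long : Int) (procesada : List Int) (item : Int) :
    Nat → Int → Int → Int
  | 0, _, count => count
  | fuel + 1, index2, count =>
    if index2 < long ∧ item ∉ procesada then
      pvWhileA items long procesada item fuel (index2 + 1)
        (if item ∈ PySem.List.slice items (some index2) none then count + 1 else count)
    else count

def create_inventory (items : List Int) : List (Int × Int) :=
  let long : Int := items.length
  let st := (PySem.List.enumerate items).foldl
    (fun (st : PySem.Dict Int Int × List Int) (p : Int × Int) =>
      if p.2 ∈ st.2 then st
      else
        let count := pvWhileA items long st.2 p.2 items.length (p.1 + 1) 1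
        (st.1.insert p.2 count, st.2 ++ [p.2]))
    (PySem.Dict.empty, [])
  st.1.items

-- ===== PORT B =====
def create_inventory_alt (items : List Int) : List (Int × Int) :=
  let st := (PySem.List.enumerate items).foldl
    (fun (st : PySem.Dict Int Int × PySem.Dict Int Int) (p : Int × Int) =>
      (if st.1.contains p.2 then st.1 else st.1.insert p.2 p.1, st.2.insert p.2 p.1))
    (PySem.Dict.empty, PySem.Dict.empty)
  ((st.1.keys).foldl
    (fun (d : PySem.Dict Int Int) k => d.insert k (st.2.getD k 0 - st.1.getD k 0 + 1))
    PySem.Dict.empty).items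

-- ===== PRECONDITION & SPEC =====
def Spec_create_inventory (items : List Int) (out : List (Int × Int)) : Prop := out = create_inventory_alt items
instance (items : List Int) (out : List (Int × Int)) : Decidable (Spec_create_inventory items out) := by unfold Spec_create_inventory; infer_instance

-- ===== CLAIM (what is proved, stated in full; the proofs are below) =====
def Claim_equal_create_inventory : Prop := ∀ (items : List Int), Dom_create_inventory items → Spec_create_inventory items (create_inventory items)

-- ===== LEMMAS AND PROOFS =====

-- index of the first occurrence of x in l (-1 if absent)
def pvFirstIdx : List Int → Int → Int
  | [], _ => -1
  | a :: t, x => if a = x then 0 else (if 0 ≤ pvFirstIdx t x then pvFirstIdx t x + 1 else -1)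

-- index of the last occurrence of x in l (-1 if absent)
def pvLastIdx : List Int → Int → Int
  | [], _ => -1
  | a :: t, x => if 0 ≤ pvLastIdx t x then pvLastIdx t x + 1 else (if a = x then 0 else -1)

-- the common result: distinct items in first-occurrence order, each with span last-first+1
def pvRes (items : List Int) : List (Int × Int) :=
  (PySem.List.dedup items).map (fun x => (x, pvLastIdx items x - pvFirstIdx items x + 1))

theorem pvLastIdx_lt_length (l : List Int) (x : Int) : pvLastIdx l x < l.length := by
  induction l with
  | nil => simp [pvLastIdx]
  | cons a t ih => simp only [pvLastIdx, List.length_cons]; split_ifs <;> push_cast <;> omega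

theorem pvLastIdx_nonneg_iff (l : List Int) (x : Int) : 0 ≤ pvLastIdx l x ↔ x ∈ l := by
  induction l with
  | nil => simp [pvLastIdx]
  | cons a t ih =>
    simp only [pvLastIdx, List.mem_cons]
    split_ifs with h1 h2 <;> simp_all <;> omega

theorem pvMem_drop_iff (l : List Int) (x : Int) (j : Nat) :
    x ∈ l.drop j ↔ (j : Int) ≤ pvLastIdx l x := by
  induction l generalizing j with
  | nil => simp [pvLastIdx]; omega
  | cons a t ih =>
    cases j with
    | zero => simpa using (pvLastIdx_nonneg_iff (a :: t) x).symm
    | succ n =>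
      have h1 := ih n
      have h2 := pvLastIdx_nonneg_iff t x
      simp only [List.drop_succ_cons, pvLastIdx, h1]
      split_ifs with h4 h5 <;> push_cast <;> simp_all <;> omega

theorem pvWhileA_eq (l : List Int) (proc : List Int) (item : Int)
    (hproc : item ∉ proc) :
    ∀ (fuel : Nat) (index2 count : Int), 0 ≤ index2 →
      (l.length : Int) ≤ index2 + fuel →
      pvWhileA l (l.length : Int) proc item fuel index2 count
        = count + max 0 (pvLastIdx l item + 1 - index2) := by
  intro fuel
  induction fuel with
  | zero =>
    intro index2 count h0 hf
    have := pvLastIdx_lt_length l item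
    simp only [pvWhileA]
    omega
  | succ n ih =>
    intro index2 count h0 hf
    have hlt := pvLastIdx_lt_length l item
    by_cases hi : index2 < (l.length : Int)
    · obtain ⟨m, rfl⟩ : ∃ m : Nat, index2 = (m : Int) := ⟨index2.toNat, by omega⟩
      simp only [pvWhileA, if_pos (And.intro hi hproc), PySem.List.slice_from_natCast]
      rw [ih ((m : Int) + 1) _ (by omega) (by push_cast at hf ⊢; omega)]
      have hiff := pvMem_drop_iff l item m
      by_cases hm : item ∈ l.drop m
      · rw [if_pos hm]; have := hiff.mp hm; omega
      · rw [if_neg hm]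
        have : ¬ ((m : Int) ≤ pvLastIdx l item) := fun h => hm (hiff.mpr h)
        omega
    · simp only [pvWhileA, if_neg (fun h : _ ∧ _ => hi h.1)]
      omega

theorem pvFirstIdx_append_of_mem (p q : List Int) (x : Int) (hx : x ∈ p) :
    pvFirstIdx (p ++ q) x = pvFirstIdx p x := by
  induction p with
  | nil => simp at hx
  | cons a t ih =>
    simp only [List.cons_append, pvFirstIdx]
    rcases List.mem_cons.mp hx with h | h
    · simp [h]
    · by_cases hax : a = x
      · simp [hax]
      · rw [if_neg hax, if_neg hax, ih h]

theorem pvFirstIdx_append_of_not_mem (p t : List Int) (x : Int) (hx : x ∉ p) :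
    pvFirstIdx (p ++ x :: t) x = (p.length : Int) := by
  induction p with
  | nil => simp [pvFirstIdx]
  | cons a s ih =>
    have hax : a ≠ x := fun h => hx (by simp [h])
    have hxs : x ∉ s := fun h => hx (by simp [h])
    have h0 : (0:Int) ≤ pvFirstIdx (s ++ x :: t) x := by
      rw [ih hxs]; positivity
    simp only [List.cons_append, pvFirstIdx, if_neg hax, ih hxs, List.length_cons]
    rw [if_pos (by positivity : (0:Int) ≤ (s.length : Int))]
    push_cast; ring

theorem pvLastIdx_append_singleton_self (p : List Int) (x : Int) :
    pvLastIdx (p ++ [x]) x = (p.length : Int) := by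
  induction p with
  | nil => simp [pvLastIdx]
  | cons a t ih =>
    have h0 : (0:Int) ≤ pvLastIdx (t ++ [x]) x := by rw [ih]; positivity
    simp only [List.cons_append, pvLastIdx, ih, List.length_cons]
    rw [if_pos (by positivity : (0:Int) ≤ (t.length : Int))]
    push_cast; ring

theorem pvLastIdx_append_singleton_ne (p : List Int) (x y : Int) (h : y ≠ x) :
    pvLastIdx (p ++ [x]) y = pvLastIdx p y := by
  induction p with
  | nil =>
    have hxy : ¬ x = y := fun hh => h hh.symm
    simp [pvLastIdx, hxy]
  | cons a t ih =>
    simp only [List.cons_append, pvLastIdx, ih]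

theorem pvDedup_append_mem (p : List Int) (a : Int) (hm : a ∈ p) :
    PySem.List.dedup (p ++ [a]) = PySem.List.dedup p := by
  simp only [PySem.List.dedup_eq_ofList, PySem.Set.ofList_append_singleton]
  exact PySem.Set.add_of_mem (by simpa [PySem.Set.mem_ofList] using hm)

theorem pvDedup_append_not_mem (p : List Int) (a : Int) (hm : a ∉ p) :
    PySem.List.dedup (p ++ [a]) = PySem.List.dedup p ++ [a] := by
  simp only [PySem.List.dedup_eq_ofList, PySem.Set.ofList_append_singleton]
  exact PySem.Set.add_of_not_mem (by simpa [PySem.Set.mem_ofList] using hm)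

theorem pvA_fold (items : List Int) :
    ∀ (rest p : List Int), p ++ rest = items →
    (PySem.List.enumerate rest ((p.length : Int))).foldl
      (fun (st : PySem.Dict Int Int × List Int) (q : Int × Int) =>
        if q.2 ∈ st.2 then st
        else
          (st.1.insert q.2 (pvWhileA items ((items.length : Int)) st.2 q.2 items.length (q.1 + 1) 1),
           st.2 ++ [q.2]))
      (PySem.Dict.mk ((PySem.List.dedup p).map fun x => (x, pvLastIdx items x - pvFirstIdx items x + 1)),
       PySem.List.dedup p)
    = (PySem.Dict.mk ((PySem.List.dedup items).map fun x => (x, pvLastIdx items x - pvFirstIdx items x + 1)),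
       PySem.List.dedup items) := by
  intro rest
  induction rest with
  | nil =>
    intro p h
    simp only [List.append_nil] at h
    subst h
    simp [PySem.List.enumerate_nil]
  | cons a t ih =>
    intro p h
    rw [PySem.List.enumerate_cons, List.foldl_cons]
    by_cases hm : a ∈ p
    · rw [if_pos (by simpa [PySem.List.mem_dedup] using hm)]
      have hh : (p ++ [a]) ++ t = items := by simpa using h
      have := ih (p ++ [a]) hh
      rw [pvDedup_append_mem p a hm] at this
      simpa [List.length_append] using this
    · rw [if_neg (by simpa [PySem.List.mem_dedup] using hm)]
      -- the computed count is last - first + 1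
      have hproc : a ∉ PySem.List.dedup p := by simpa [PySem.List.mem_dedup] using hm
      have hw := pvWhileA_eq items (PySem.List.dedup p) a hproc items.length
        ((p.length : Int) + 1) 1 (by positivity) (by omega)
      have hdrop : a ∈ items.drop p.length := by
        rw [← h, List.drop_left]; simp
      have hlast := (pvMem_drop_iff items a p.length).mp hdrop
      have hfirst : pvFirstIdx items a = (p.length : Int) := by
        rw [← h]; exact pvFirstIdx_append_of_not_mem p t a hm
      have hcount : pvWhileA items ((items.length : Int)) (PySem.List.dedup p) a items.length
          ((p.length : Int) + 1) 1 = pvLastIdx items a - pvFirstIdx items a + 1 := by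
        rw [hw, hfirst]; omega
      rw [hcount]
      -- the insert appends a fresh key
      have hc : (PySem.Dict.mk ((PySem.List.dedup p).map fun x =>
          (x, pvLastIdx items x - pvFirstIdx items x + 1))).contains a = false := by
        simp [PySem.Dict.contains_eq_decide_mem_keys, PySem.Dict.keys_mk, List.map_map, hm]
      have hins : (PySem.Dict.mk ((PySem.List.dedup p).map fun x =>
            (x, pvLastIdx items x - pvFirstIdx items x + 1))).insert a
              (pvLastIdx items a - pvFirstIdx items a + 1)
          = PySem.Dict.mk ((PySem.List.dedup (p ++ [a])).map fun x =>
              (x, pvLastIdx items x - pvFirstIdx items x + 1)) := by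
        apply PySem.Dict.ext
        rw [PySem.Dict.items_insert_of_not_contains _ _ hc]
        rw [pvDedup_append_not_mem p a hm]
        simp
      rw [hins, ← pvDedup_append_not_mem p a hm]
      have hh : (p ++ [a]) ++ t = items := by simpa using h
      have := ih (p ++ [a]) hh
      simpa [List.length_append] using this

theorem pvA_eq (items : List Int) : create_inventory items = pvRes items := by
  have := pvA_fold items items [] (by simp)
  unfold create_inventory pvRes
  simp only [List.length_nil, Nat.cast_zero] at this
  rw [show PySem.List.dedup ([] : List Int) = [] from rfl] at this
  simp only [List.map_nil] at this
  rw [show (PySem.Dict.mk ([] : List (Int × Int))) = (PySem.Dict.empty : PySem.Dict Int Int) from rfl] at this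
  simp only [this]

theorem pvB_fold (items : List Int) :
    ∀ (rest p : List Int), p ++ rest = items →
    (PySem.List.enumerate rest ((p.length : Int))).foldl
      (fun (st : PySem.Dict Int Int × PySem.Dict Int Int) (q : Int × Int) =>
        (if st.1.contains q.2 then st.1 else st.1.insert q.2 q.1, st.2.insert q.2 q.1))
      (PySem.Dict.mk ((PySem.List.dedup p).map fun x => (x, pvFirstIdx p x)),
       PySem.Dict.mk ((PySem.List.dedup p).map fun x => (x, pvLastIdx p x)))
    = (PySem.Dict.mk ((PySem.List.dedup items).map fun x => (x, pvFirstIdx items x)),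
       PySem.Dict.mk ((PySem.List.dedup items).map fun x => (x, pvLastIdx items x))) := by
  intro rest
  induction rest with
  | nil =>
    intro p h
    simp only [List.append_nil] at h
    subst h
    simp [PySem.List.enumerate_nil]
  | cons a t ih =>
    intro p h
    rw [PySem.List.enumerate_cons, List.foldl_cons]
    have hcont : (PySem.Dict.mk ((PySem.List.dedup p).map fun x => (x, pvFirstIdx p x))).contains a
        = decide (a ∈ p) := by
      simp [PySem.Dict.contains_eq_decide_mem_keys, PySem.Dict.keys_mk, List.map_map]
    have hcontL : (PySem.Dict.mk ((PySem.List.dedup p).map fun x => (x, pvLastIdx p x))).contains a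
        = decide (a ∈ p) := by
      simp [PySem.Dict.contains_eq_decide_mem_keys, PySem.Dict.keys_mk, List.map_map]
    by_cases hm : a ∈ p
    · -- seen before: first unchanged, last overwritten in place
      have hfirst : (PySem.Dict.mk ((PySem.List.dedup (p ++ [a])).map fun x => (x, pvFirstIdx (p ++ [a]) x)))
          = PySem.Dict.mk ((PySem.List.dedup p).map fun x => (x, pvFirstIdx p x)) := by
        apply PySem.Dict.ext
        rw [pvDedup_append_mem p a hm]
        exact List.map_congr_left (fun x hx => by
          rw [pvFirstIdx_append_of_mem p [a] x ((PySem.List.mem_dedup _ _).mp hx)])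
      have hlastd : (PySem.Dict.mk ((PySem.List.dedup p).map fun x => (x, pvLastIdx p x))).insert a ((p.length : Int))
          = PySem.Dict.mk ((PySem.List.dedup (p ++ [a])).map fun x => (x, pvLastIdx (p ++ [a]) x)) := by
        apply PySem.Dict.ext
        rw [PySem.Dict.items_insert_of_contains _ _ (by rw [hcontL]; simpa using hm)]
        rw [pvDedup_append_mem p a hm]
        simp only [List.map_map]
        exact List.map_congr_left (fun x hx => by
          by_cases hxa : x = a
          · subst hxa
            simp [pvLastIdx_append_singleton_self]
          · simp [Function.comp, hxa, pvLastIdx_append_singleton_ne p a x hxa])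
      rw [if_pos (by rw [hcont]; simpa using hm), hlastd, ← hfirst]
      have := ih (p ++ [a]) (by simpa using h)
      simpa [List.length_append] using this
    · -- fresh item: both dicts append (a, p.length)
      have hfirst : (PySem.Dict.mk ((PySem.List.dedup p).map fun x => (x, pvFirstIdx p x))).insert a ((p.length : Int))
          = PySem.Dict.mk ((PySem.List.dedup (p ++ [a])).map fun x => (x, pvFirstIdx (p ++ [a]) x)) := by
        apply PySem.Dict.ext
        rw [PySem.Dict.items_insert_of_not_contains _ _ (by rw [hcont]; simpa using hm)]
        rw [pvDedup_append_not_mem p a hm]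
        simp only [List.map_append, List.map_cons, List.map_nil]
        congr 1
        · exact List.map_congr_left (fun x hx => by
            rw [pvFirstIdx_append_of_mem p [a] x ((PySem.List.mem_dedup _ _).mp hx)])
        · rw [show p ++ [a] = p ++ a :: [] from rfl, pvFirstIdx_append_of_not_mem p [] a hm]
      have hlastd : (PySem.Dict.mk ((PySem.List.dedup p).map fun x => (x, pvLastIdx p x))).insert a ((p.length : Int))
          = PySem.Dict.mk ((PySem.List.dedup (p ++ [a])).map fun x => (x, pvLastIdx (p ++ [a]) x)) := by
        apply PySem.Dict.ext
        rw [PySem.Dict.items_insert_of_not_contains _ _ (by rw [hcontL]; simpa using hm)]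
        rw [pvDedup_append_not_mem p a hm]
        simp only [List.map_append, List.map_cons, List.map_nil]
        congr 1
        · exact List.map_congr_left (fun x hx => by
            by_cases hxa : x = a
            · exact absurd ((PySem.List.mem_dedup _ _).mp (hxa ▸ hx)) hm
            · rw [pvLastIdx_append_singleton_ne p a x hxa])
        · rw [pvLastIdx_append_singleton_self]
      rw [if_neg (by rw [hcont]; simpa using hm), hfirst, hlastd]
      have := ih (p ++ [a]) (by simpa using h)
      simpa [List.length_append] using this

theorem pvB_eq (items : List Int) : create_inventory_alt items = pvRes items := by
  have hfold := pvB_fold items items [] (by simp)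
  simp only [List.length_nil, Nat.cast_zero] at hfold
  rw [show PySem.List.dedup ([] : List Int) = [] from rfl] at hfold
  simp only [List.map_nil] at hfold
  rw [show (PySem.Dict.mk ([] : List (Int × Int))) = (PySem.Dict.empty : PySem.Dict Int Int) from rfl] at hfold
  unfold create_inventory_alt
  rw [hfold]
  have hkeys : (PySem.Dict.mk ((PySem.List.dedup items).map fun x => (x, pvFirstIdx items x))).keys
      = PySem.List.dedup items := by
    simp [PySem.Dict.keys_mk, List.map_map, Function.comp_def]
  have hnodup := PySem.List.nodup_dedup items
  show (List.foldl (fun (d : PySem.Dict Int Int) k => d.insert k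
      ((PySem.Dict.mk ((PySem.List.dedup items).map fun x => (x, pvLastIdx items x))).getD k 0
        - (PySem.Dict.mk ((PySem.List.dedup items).map fun x => (x, pvFirstIdx items x))).getD k 0 + 1))
      PySem.Dict.empty
      ((PySem.Dict.mk ((PySem.List.dedup items).map fun x => (x, pvFirstIdx items x))).keys)).items
    = pvRes items
  rw [hkeys]
  rw [PySem.Dict.items_foldl_insert_fresh (PySem.List.dedup items) (fun x => x) _ _
    (fun a _ => by simp [PySem.Dict.contains_empty]) (by simp)]
  unfold pvRes
  rw [show (PySem.Dict.empty : PySem.Dict Int Int).items = [] from rfl, List.nil_append]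
  refine List.map_congr_left (fun k hk => ?_)
  have hF : (PySem.Dict.mk ((PySem.List.dedup items).map fun x => (x, pvFirstIdx items x))).getD k 0
      = pvFirstIdx items k := by
    refine PySem.Dict.getD_of_mem_items _ ?_ ?_ 0
    · exact List.mem_map.mpr ⟨k, hk, rfl⟩
    · rw [hkeys]; exact hnodup
  have hL : (PySem.Dict.mk ((PySem.List.dedup items).map fun x => (x, pvLastIdx items x))).getD k 0
      = pvLastIdx items k := by
    refine PySem.Dict.getD_of_mem_items _ ?_ ?_ 0
    · exact List.mem_map.mpr ⟨k, hk, rfl⟩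
    · simp only [PySem.Dict.keys_mk, List.map_map, Function.comp_def]
      simp
  rw [hF, hL]

-- ===== VERDICT (by name: the statement is the Claim_ definition above) =====
theorem create_inventory_spec : Claim_equal_create_inventory := by
  intro items _
  unfold Spec_create_inventory
  rw [pvA_eq, pvB_eq]
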